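-- pv_equiv track=rewrite | github.com/mindspore-lab/mindformers | mindformers/experimental/parallel_core/pynative/parallel_policy_shard/utils.py | get_all_merges
-- ===== SOURCE A (Python) =====
-- def get_all_merges(nproc_per_node):
--     """get all merges of each node"""
--     if len(nproc_per_node) == 1:
--         return [nproc_per_node]
--
--     merges = []
--     # check all possible splits where the sum of the left part is a multiplt of 8
--     for i in range(1, len(nproc_per_node)):
--         left = nproc_per_node[:i]
--         right = nproc_per_node[i:]
--         if sum(left) % 8 == 0:
--             for l_merge in get_all_merges(left):
--                 for r_merge in get_all_merges(right):
--                     merges.append(l_merge + r_merge)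
--
--     # consider the case where the entire list is merged if the sum is multiple of 8
--     if sum(nproc_per_node) % 8 == 0:
--         merges.append([sum(nproc_per_node)])
--     return merges if merges else [nproc_per_node]
-- ===== SOURCE B (Python) =====
-- def get_all_merges(nproc_per_node):
--     """get all merges of each node — memoized: each contiguous sub-range [s:e] is
--     solved once (cached by index pair), with precomputed prefix sums replacing
--     repeated sum() scans."""
--     n = len(nproc_per_node)
--     pref = [0]
--     acc = 0
--     for x in nproc_per_node:
--         acc = acc + x
--         pref.append(acc)
--     memo = {}
--
--     def solve(s, e):
--         if (s, e) in memo: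
--             return memo[(s, e)]
--         merges = []
--         for i in range(s + 1, e):
--             if (pref[i] - pref[s]) % 8 == 0:
--                 for l_merge in solve(s, i):
--                     for r_merge in solve(i, e):
--                         merges.append(l_merge + r_merge)
--         total = pref[e] - pref[s]
--         if total % 8 == 0:
--             merges.append([total])
--         res = merges if merges else [nproc_per_node[s:e]]
--         memo[(s, e)] = res
--         return res
--
--     return solve(0, n)
-- ===== Notes on version B (the rewrite author's own statement) =====
-- stated objective: alternative
-- what changed: Replaced A's plain top-down recursion on list slices (which re-solves the same contiguous sub-ranges over and over) by index-pair recursion with a memo dict so each sub-range is solved once, and precomputed prefix sums replacing repeated sum() scans.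
import Mathlib
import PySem

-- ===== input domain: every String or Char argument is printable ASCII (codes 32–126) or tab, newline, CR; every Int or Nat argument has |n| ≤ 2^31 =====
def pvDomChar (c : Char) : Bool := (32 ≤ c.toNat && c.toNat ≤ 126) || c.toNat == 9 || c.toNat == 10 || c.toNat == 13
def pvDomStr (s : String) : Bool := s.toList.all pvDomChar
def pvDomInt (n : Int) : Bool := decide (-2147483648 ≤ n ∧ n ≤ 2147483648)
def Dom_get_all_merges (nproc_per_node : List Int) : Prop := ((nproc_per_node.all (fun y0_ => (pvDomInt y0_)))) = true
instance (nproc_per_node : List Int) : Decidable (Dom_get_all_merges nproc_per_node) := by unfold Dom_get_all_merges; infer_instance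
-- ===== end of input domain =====

-- B replaces A's plain recursion on list slices (which re-solves the same contiguous
-- sub-range many times) by index-pair recursion with a memo dict and precomputed
-- prefix sums, so each sub-range is solved once (objective: alternative).

-- ===== PORT A =====
-- Literal transliteration of A; the structural recursion is made total with a fuel
-- argument (fuel only guards termination: l.length + 1 always suffices, since every
-- recursive call is on a strictly shorter nonempty slice).
def gamFuel : Nat → List Int → List (List Int)
  | 0, _ => []
  | fuel+1, l =>
    if l.length = 1 then [l]
    else
      let merges := (PySem.List.pyRange 1 (l.length : Int) 1).foldl (fun acc i =>
        let left := PySem.List.slice l none (some i)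
        let right := PySem.List.slice l (some i) none
        if PySem.Int.mod left.sum 8 = 0 then
          (gamFuel fuel left).foldl (fun acc2 lm =>
            (gamFuel fuel right).foldl (fun acc3 rm => acc3 ++ [lm ++ rm]) acc2) acc
        else acc) []
      let merges := if PySem.Int.mod l.sum 8 = 0 then merges ++ [[l.sum]] else merges
      if merges = [] then [l] else merges

def get_all_merges (nproc_per_node : List Int) : List (List Int) :=
  gamFuel (nproc_per_node.length + 1) nproc_per_node

-- ===== PORT B =====
-- Source B's inner `solve(s, e)` with its memo dict threaded explicitly through the
-- recursion; `fuel` only guards termination (l.length + 1 always suffices: every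
-- recursive call is on a strictly shorter index range).  Source B re-evaluates
-- `solve(i, e)` per l_merge iteration; on a warm memo every such call returns the
-- same cached list with the memo unchanged, so it is ported as a single call.
def solveMemo (l pref : List Int) :
    Nat → PySem.Dict (Int × Int) (List (List Int)) → Int → Int →
      (List (List Int) × PySem.Dict (Int × Int) (List (List Int)))
  | fuel, memo, s, e =>
    match memo.get? (s, e) with
    | some v => (v, memo)
    | none =>
      match fuel with
      | 0 => ([], memo)
      | fuel + 1 =>
        let st := (PySem.List.pyRange (s + 1) e 1).foldl
          (fun (am : List (List Int) × PySem.Dict (Int × Int) (List (List Int))) i =>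
            if PySem.Int.mod (PySem.List.pyGetD pref i 0 - PySem.List.pyGetD pref s 0) 8 = 0 then
              let lsm := solveMemo l pref fuel am.2 s i
              let rsm := solveMemo l pref fuel lsm.2 i e
              (lsm.1.foldl (fun acc2 lm =>
                rsm.1.foldl (fun acc3 rm => acc3 ++ [lm ++ rm]) acc2) am.1, rsm.2)
            else am) ([], memo)
        let total := PySem.List.pyGetD pref e 0 - PySem.List.pyGetD pref s 0
        let merges := if PySem.Int.mod total 8 = 0 then st.1 ++ [[total]] else st.1
        let res := if merges = [] then [PySem.List.slice l (some s) (some e)] else merges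
        (res, st.2.insert (s, e) res)

def get_all_merges_alt (nproc_per_node : List Int) : List (List Int) :=
  let pref := (nproc_per_node.foldl
    (fun (pa : List Int × Int) x => (pa.1 ++ [pa.2 + x], pa.2 + x)) ([0], 0)).1
  (solveMemo nproc_per_node pref (nproc_per_node.length + 1) PySem.Dict.empty
    0 (nproc_per_node.length : Int)).1

-- ===== PRECONDITION & SPEC =====
def Spec_get_all_merges (nproc_per_node : List Int) (out : List (List Int)) : Prop := out = get_all_merges_alt nproc_per_node
instance (nproc_per_node : List Int) (out : List (List Int)) : Decidable (Spec_get_all_merges nproc_per_node out) := by unfold Spec_get_all_merges; infer_instance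

-- ===== CLAIM (what is proved, stated in full; the proofs are below) =====
def Claim_equal_get_all_merges : Prop := ∀ (nproc_per_node : List Int), Dom_get_all_merges nproc_per_node → Spec_get_all_merges nproc_per_node (get_all_merges nproc_per_node)

-- ===== LEMMAS AND PROOFS =====

-- the contiguous sub-range l[s:e] (Nat indices)
def subR (l : List Int) (s e : Nat) : List Int := (l.drop s).take (e - s)

-- the prefix-sum list Source B builds
def prefL (l : List Int) : List Int := (List.range (l.length + 1)).map (fun k => ((l.take k).sum))

lemma prefL_fold (l : List Int) : ∀ (p : List Int) (a : Int),
    l.foldl (fun (pa : List Int × Int) x => (pa.1 ++ [pa.2 + x], pa.2 + x)) (p, a)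
      = (p ++ (List.range l.length).map (fun k => a + (l.take (k+1)).sum), a + l.sum) := by
  induction l with
  | nil => simp
  | cons x xs ih =>
    intro p a
    simp only [List.foldl_cons, ih (p ++ [a + x]) (a + x), List.length_cons, List.range_succ_eq_map,
      List.map_cons, List.map_map, List.sum_cons, List.take_succ_cons, List.take_zero]
    refine Prod.ext ?_ (by simp; ring)
    simp only [List.append_assoc, List.cons_append, List.nil_append, List.sum_nil, add_zero]
    congr 2
    apply List.map_congr_left
    intro k _
    simp only [Function.comp_apply]
    ring

lemma prefL_eq (l : List Int) :
    (l.foldl (fun (pa : List Int × Int) x => (pa.1 ++ [pa.2 + x], pa.2 + x)) ([0], 0)).1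
      = prefL l := by
  rw [prefL_fold l [0] 0]
  simp only [prefL, List.range_succ_eq_map, List.map_cons]
  simp [List.map_map, Function.comp_def]

lemma prefL_get (l : List Int) (k : Nat) (hk : k ≤ l.length) :
    PySem.List.pyGetD (prefL l) (k : Int) 0 = (l.take k).sum := by
  have hlen : k < (List.range (l.length + 1)).length := by simp; omega
  simp only [prefL, PySem.List.pyGetD_natCast]
  rw [PySem.List.getD_map_range _ _ _ _ (by omega)]

lemma length_subR (l : List Int) (s e : Nat) (hse : s ≤ e) (he : e ≤ l.length) :
    (subR l s e).length = e - s := by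
  simp only [subR, List.length_take, List.length_drop]
  omega

lemma take_subR (l : List Int) (s e j : Nat) (hj : j ≤ e - s) :
    (subR l s e).take j = subR l s (s + j) := by
  simp only [subR, List.take_take]
  congr 1
  omega

lemma drop_subR (l : List Int) (s e j : Nat) :
    (subR l s e).drop j = subR l (s + j) e := by
  simp only [subR, List.drop_take, List.drop_drop]
  congr 1
  omega

lemma sum_subR (l : List Int) (s e : Nat) (hse : s ≤ e) (_he : e ≤ l.length) :
    (subR l s e).sum = (l.take e).sum - (l.take s).sum := by
  have h1 : l.take s ++ subR l s e = l.take e := by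
    simp only [subR]
    rw [← List.drop_take]
    conv_lhs => rw [show List.take s l = List.take s (List.take e l) from by
      rw [List.take_take, Nat.min_eq_left hse]]
    exact List.take_append_drop s (l.take e)
  have := congrArg List.sum h1
  simp only [List.sum_append] at this
  omega

lemma gamFuel_irrel : ∀ (f g : Nat) (l : List Int), l.length < f → l.length < g →
    gamFuel f l = gamFuel g l := by
  intro f
  induction f with
  | zero => intro g l hf; omega
  | succ f ih =>
    intro g l hf hg
    match g, hg with
    | g+1, hg =>
    simp only [gamFuel]
    by_cases h1 : l.length = 1
    · simp [h1]
    · simp only [h1, if_false]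
      have hfold : ∀ (init : List (List Int)),
          (PySem.List.pyRange 1 (l.length : Int) 1).foldl (fun acc i =>
            let left := PySem.List.slice l none (some i)
            let right := PySem.List.slice l (some i) none
            if PySem.Int.mod left.sum 8 = 0 then
              (gamFuel f left).foldl (fun acc2 lm =>
                (gamFuel f right).foldl (fun acc3 rm => acc3 ++ [lm ++ rm]) acc2) acc
            else acc) init
          = (PySem.List.pyRange 1 (l.length : Int) 1).foldl (fun acc i =>
            let left := PySem.List.slice l none (some i)
            let right := PySem.List.slice l (some i) none
            if PySem.Int.mod left.sum 8 = 0 then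
              (gamFuel g left).foldl (fun acc2 lm =>
                (gamFuel g right).foldl (fun acc3 rm => acc3 ++ [lm ++ rm]) acc2) acc
            else acc) init := by
        intro init
        apply PySem.List.foldl_congr_mem
        intro acc i hi
        rw [PySem.List.mem_pyRange_one] at hi
        have h0i : 0 ≤ i := by omega
        have hleft : (PySem.List.slice l none (some i)).length < l.length := by
          rw [PySem.List.slice_to _ h0i]
          simp only [List.length_take]
          omega
        have hright : (PySem.List.slice l (some i) none).length < l.length := by
          rw [PySem.List.slice_from _ h0i]
          simp only [List.length_drop]
          omega
        simp only
        rw [ih g _ (by omega) (by omega), ih g _ (by omega) (by omega)]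
      rw [hfold]

-- every entry of the memo is the value A computes on its sub-range
def MemoOK (l : List Int) (memo : PySem.Dict (Int × Int) (List (List Int))) : Prop :=
  ∀ (s e : Nat) (v : List (List Int)), memo.get? ((s : Int), (e : Int)) = some v →
    s ≤ e ∧ e ≤ l.length ∧ v = get_all_merges (subR l s e)

lemma solve_spec (l : List Int) : ∀ (fuel : Nat) (s e : Nat)
    (memo : PySem.Dict (Int × Int) (List (List Int))),
    s ≤ e → e ≤ l.length → e - s < fuel → MemoOK l memo →
    (solveMemo l (prefL l) fuel memo (s : Int) (e : Int)).1 = get_all_merges (subR l s e) ∧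
      MemoOK l (solveMemo l (prefL l) fuel memo (s : Int) (e : Int)).2 := by
  intro fuel
  induction fuel with
  | zero => intro s e memo hs he hf; omega
  | succ f ih =>
    intro s e memo hs he hf hok
    cases hget : memo.get? ((s : Int), (e : Int)) with
    | some v =>
      obtain ⟨_, _, hv⟩ := hok s e v hget
      simp only [solveMemo, hget]
      exact ⟨hv, hok⟩
    | none =>
      simp only [solveMemo, hget]
      have hml : (subR l s e).length = e - s := length_subR l s e hs he
      have hsum : (subR l s e).sum = (l.take e).sum - (l.take s).sum := sum_subR l s e hs he
      have hslice : PySem.List.slice l (some (s : Int)) (some (e : Int)) = subR l s e := by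
        rw [PySem.List.slice_natCast]; rfl
      rw [prefL_get l s (by omega), prefL_get l e he]
      rw [show PySem.List.pyRange ((s : Int) + 1) (e : Int) 1
          = (List.range (e - s - 1)).map (fun (k : Nat) => ((s : Int) + 1) + (k : Int)) from by
        rw [PySem.List.pyRange_one,
          show ((e : Int) - ((s : Int) + 1)).toNat = e - s - 1 from by omega]]
      rw [List.foldl_map]
      -- the fold over split points: B's memoized calls return A's values and keep the memo OK
      have key : ∀ (ks : List Nat), (∀ k ∈ ks, k < e - s - 1) →
          ∀ (acc : List (List Int)) (memo' : PySem.Dict (Int × Int) (List (List Int))),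
          MemoOK l memo' →
          (ks.foldl (fun am (k : Nat) =>
            if PySem.Int.mod (PySem.List.pyGetD (prefL l) ((s : Int) + 1 + (k : Int)) 0
                - (l.take s).sum) 8 = 0 then
              ((solveMemo l (prefL l) f am.2 ((s : Int)) ((s : Int) + 1 + (k : Int))).1.foldl
                (fun acc2 lm =>
                  (solveMemo l (prefL l) f
                    (solveMemo l (prefL l) f am.2 ((s : Int)) ((s : Int) + 1 + (k : Int))).2
                    ((s : Int) + 1 + (k : Int)) ((e : Int))).1.foldl
                    (fun acc3 rm => acc3 ++ [lm ++ rm]) acc2) am.1,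
                (solveMemo l (prefL l) f
                  (solveMemo l (prefL l) f am.2 ((s : Int)) ((s : Int) + 1 + (k : Int))).2
                  ((s : Int) + 1 + (k : Int)) ((e : Int))).2)
            else am) (acc, memo')).1
          = ks.foldl (fun (a : List (List Int)) (k : Nat) =>
              if PySem.Int.mod ((l.take (s + 1 + k)).sum - (l.take s).sum) 8 = 0 then
                (get_all_merges (subR l s (s + 1 + k))).foldl (fun acc2 lm =>
                  (get_all_merges (subR l (s + 1 + k) e)).foldl
                    (fun acc3 rm => acc3 ++ [lm ++ rm]) acc2) a
              else a) acc
          ∧ MemoOK l (ks.foldl (fun am (k : Nat) =>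
            if PySem.Int.mod (PySem.List.pyGetD (prefL l) ((s : Int) + 1 + (k : Int)) 0
                - (l.take s).sum) 8 = 0 then
              ((solveMemo l (prefL l) f am.2 ((s : Int)) ((s : Int) + 1 + (k : Int))).1.foldl
                (fun acc2 lm =>
                  (solveMemo l (prefL l) f
                    (solveMemo l (prefL l) f am.2 ((s : Int)) ((s : Int) + 1 + (k : Int))).2
                    ((s : Int) + 1 + (k : Int)) ((e : Int))).1.foldl
                    (fun acc3 rm => acc3 ++ [lm ++ rm]) acc2) am.1,
                (solveMemo l (prefL l) f
                  (solveMemo l (prefL l) f am.2 ((s : Int)) ((s : Int) + 1 + (k : Int))).2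
                  ((s : Int) + 1 + (k : Int)) ((e : Int))).2)
            else am) (acc, memo')).2 := by
        intro ks
        induction ks with
        | nil => intro _ acc memo' hok'; exact ⟨rfl, hok'⟩
        | cons k ks ihk =>
          intro hks acc memo' hok'
          have hk : k < e - s - 1 := hks k (List.mem_cons_self)
          have hcast : (s : Int) + 1 + (k : Int) = ((s + 1 + k : Nat) : Int) := by
            push_cast; ring
          simp only [List.foldl_cons, hcast, prefL_get l (s + 1 + k) (by omega)]
          by_cases hc : PySem.Int.mod ((l.take (s + 1 + k)).sum - (l.take s).sum) 8 = 0
          · simp only [hc, if_true]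
            obtain ⟨hl1, hl2⟩ := ih s (s + 1 + k) memo' (by omega) (by omega) (by omega) hok'
            obtain ⟨hr1, hr2⟩ := ih (s + 1 + k) e
              (solveMemo l (prefL l) f memo' ((s : Nat) : Int) (((s + 1 + k : Nat)) : Int)).2
              (by omega) he (by omega) hl2
            rw [hl1, hr1]
            exact ihk (fun k' hk' => hks k' (List.mem_cons_of_mem _ hk')) _ _ hr2
          · simp only [hc, if_false]
            exact ihk (fun k' hk' => hks k' (List.mem_cons_of_mem _ hk')) acc memo' hok'
      obtain ⟨hst1, hst2⟩ := key (List.range (e - s - 1))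
        (fun k hk => List.mem_range.mp hk) [] memo hok
      rw [hst1] at *
      -- A's fold over the same split points computes the same per-step values
      have hAfold : (List.range (e - s - 1)).foldl (fun (a : List (List Int)) (k : Nat) =>
          if PySem.Int.mod ((l.take (s + 1 + k)).sum - (l.take s).sum) 8 = 0 then
            (get_all_merges (subR l s (s + 1 + k))).foldl (fun acc2 lm =>
              (get_all_merges (subR l (s + 1 + k) e)).foldl
                (fun acc3 rm => acc3 ++ [lm ++ rm]) acc2) a
          else a) []
        = (List.range (e - s - 1)).foldl (fun (a : List (List Int)) (k : Nat) =>
            let left := PySem.List.slice (subR l s e) none (some ((1 : Int) + (k : Int)))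
            let right := PySem.List.slice (subR l s e) (some ((1 : Int) + (k : Int))) none
            if PySem.Int.mod left.sum 8 = 0 then
              (gamFuel (e - s) left).foldl (fun acc2 lm =>
                (gamFuel (e - s) right).foldl (fun acc3 rm => acc3 ++ [lm ++ rm]) acc2) a
            else a) [] := by
        apply PySem.List.foldl_congr_mem
        intro a k hk
        rw [List.mem_range] at hk
        have hleft : PySem.List.slice (subR l s e) none (some ((1 : Int) + (k : Int)))
            = subR l s (s + 1 + k) := by
          rw [show ((1 : Int) + (k : Int)) = ((1 + k : Nat) : Int) from by push_cast; ring,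
            PySem.List.slice_to _ (by positivity)]
          simp only [Int.toNat_natCast]
          rw [take_subR l s e (1 + k) (by omega)]
          congr 1
          omega
        have hright : PySem.List.slice (subR l s e) (some ((1 : Int) + (k : Int))) none
            = subR l (s + 1 + k) e := by
          rw [show ((1 : Int) + (k : Int)) = ((1 + k : Nat) : Int) from by push_cast; ring,
            PySem.List.slice_from _ (by positivity)]
          simp only [Int.toNat_natCast]
          rw [drop_subR l s e (1 + k)]
          congr 1
          omega
        have hlenl : (subR l s (s + 1 + k)).length = 1 + k := by
          rw [length_subR l s (s + 1 + k) (by omega) (by omega)]; omega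
        have hlenr : (subR l (s + 1 + k) e).length = e - s - 1 - k := by
          rw [length_subR l (s + 1 + k) e (by omega) he]; omega
        have hsuml : (subR l s (s + 1 + k)).sum = (l.take (s + 1 + k)).sum - (l.take s).sum :=
          sum_subR l s (s + 1 + k) (by omega) (by omega)
        have hgl : gamFuel (e - s) (subR l s (s + 1 + k))
            = get_all_merges (subR l s (s + 1 + k)) := by
          unfold get_all_merges
          exact gamFuel_irrel _ _ _ (by rw [hlenl]; omega) (by omega)
        have hgr : gamFuel (e - s) (subR l (s + 1 + k) e)
            = get_all_merges (subR l (s + 1 + k) e) := by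
          unfold get_all_merges
          exact gamFuel_irrel _ _ _ (by rw [hlenr]; omega) (by omega)
        simp only [hleft, hright, hsuml, hgl, hgr]
      -- the value this cell gets is exactly A's value on the sub-range
      have hres : (if (if PySem.Int.mod ((l.take e).sum - (l.take s).sum) 8 = 0 then
            (List.range (e - s - 1)).foldl (fun (a : List (List Int)) (k : Nat) =>
              if PySem.Int.mod ((l.take (s + 1 + k)).sum - (l.take s).sum) 8 = 0 then
                (get_all_merges (subR l s (s + 1 + k))).foldl (fun acc2 lm =>
                  (get_all_merges (subR l (s + 1 + k) e)).foldl
                    (fun acc3 rm => acc3 ++ [lm ++ rm]) acc2) a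
              else a) [] ++ [[(l.take e).sum - (l.take s).sum]]
          else (List.range (e - s - 1)).foldl (fun (a : List (List Int)) (k : Nat) =>
              if PySem.Int.mod ((l.take (s + 1 + k)).sum - (l.take s).sum) 8 = 0 then
                (get_all_merges (subR l s (s + 1 + k))).foldl (fun acc2 lm =>
                  (get_all_merges (subR l (s + 1 + k) e)).foldl
                    (fun acc3 rm => acc3 ++ [lm ++ rm]) acc2) a
              else a) []) = [] then [PySem.List.slice l (some (s : Int)) (some (e : Int))]
          else (if PySem.Int.mod ((l.take e).sum - (l.take s).sum) 8 = 0 then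
            (List.range (e - s - 1)).foldl (fun (a : List (List Int)) (k : Nat) =>
              if PySem.Int.mod ((l.take (s + 1 + k)).sum - (l.take s).sum) 8 = 0 then
                (get_all_merges (subR l s (s + 1 + k))).foldl (fun acc2 lm =>
                  (get_all_merges (subR l (s + 1 + k) e)).foldl
                    (fun acc3 rm => acc3 ++ [lm ++ rm]) acc2) a
              else a) [] ++ [[(l.take e).sum - (l.take s).sum]]
          else (List.range (e - s - 1)).foldl (fun (a : List (List Int)) (k : Nat) =>
              if PySem.Int.mod ((l.take (s + 1 + k)).sum - (l.take s).sum) 8 = 0 then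
                (get_all_merges (subR l s (s + 1 + k))).foldl (fun acc2 lm =>
                  (get_all_merges (subR l (s + 1 + k) e)).foldl
                    (fun acc3 rm => acc3 ++ [lm ++ rm]) acc2) a
              else a) []))
          = get_all_merges (subR l s e) := by
        by_cases h01 : e - s = 1
        · obtain ⟨x, hx⟩ : ∃ x, subR l s e = [x] := by
            rw [h01] at hml
            exact List.length_eq_one_iff.mp hml
          have hxsum : (l.take e).sum - (l.take s).sum = x := by
            rw [← hsum, hx]; simp
          rw [show e - s - 1 = 0 from by omega]
          simp only [List.range_zero, List.foldl_nil, hxsum]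
          unfold get_all_merges gamFuel
          simp only [hx, List.length_cons, List.length_nil]
          by_cases hm8 : PySem.Int.mod x 8 = 0
          · have hd := (PySem.Int.mod_eq_zero_iff_dvd x 8).mp hm8
            simp [hd]
          · have hd : ¬ (8 : Int) ∣ x := fun h => hm8 ((PySem.Int.mod_eq_zero_iff_dvd x 8).mpr h)
            simp [hd, hslice, hx]
        · conv_rhs => rw [get_all_merges,
            show (subR l s e).length + 1 = (e - s) + 1 from by omega]
          conv_rhs => rw [gamFuel]
          simp only [hml, h01, if_false]
          rw [show PySem.List.pyRange 1 ((e - s : Nat) : Int) 1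
              = (List.range (e - s - 1)).map (fun (k : Nat) => (1 : Int) + (k : Int)) from by
            rw [PySem.List.pyRange_one,
              show (((e - s : Nat) : Int) - 1).toNat = e - s - 1 from by omega]]
          rw [List.foldl_map, ← hAfold, hsum]
          by_cases hm8 : PySem.Int.mod ((l.take e).sum - (l.take s).sum) 8 = 0 <;>
            simp only [hm8, if_true, if_false, hslice]
      refine ⟨hres, ?_⟩
      intro s' e' v' hv'
      rw [PySem.Dict.get?_insert] at hv'
      by_cases hk' : ((s' : Int), (e' : Int)) = ((s : Int), (e : Int))
      · rw [if_pos hk'] at hv'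
        rw [Prod.mk.injEq] at hk'
        have hs' : s' = s := by exact_mod_cast hk'.1
        have he' : e' = e := by exact_mod_cast hk'.2
        refine ⟨by omega, by omega, ?_⟩
        rw [hs', he', ← hres]
        exact (Option.some_inj.mp hv').symm
      · rw [if_neg hk'] at hv'
        exact hst2 s' e' v' hv'

-- ===== VERDICT (by name: the statement is the Claim_ definition above) =====
theorem get_all_merges_spec : Claim_equal_get_all_merges := by
  intro l _
  unfold Spec_get_all_merges get_all_merges_alt
  rw [prefL_eq]
  have h := solve_spec l (l.length + 1) 0 l.length PySem.Dict.empty (Nat.zero_le _) le_rfl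
    (by omega) (by intro s e v hv; rw [PySem.Dict.get?_empty] at hv; exact absurd hv (by simp))
  rw [show ((0 : Nat) : Int) = (0 : Int) from rfl] at h
  rw [h.1]
  have : subR l 0 l.length = l := by simp [subR]
  rw [this]
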